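-- pv_equiv track=rewrite | github.com/RebuTemp/transformation-algorithms | algorithms_with_examples/Type-I-to-Fibonacci.py | sort_function
-- ===== SOURCE A (Python) =====
-- def sort_function(FF):
--     """Remove all duplicate monomials in the feedback functions FF.
--     """
--
--     FF_Sort = []
--     for i in range(len(FF)):  # For each feedback function in FF
--         if type(FF[i]) == list:
--             tempx = FF[i]
--             tempy = []
--             for sublist in tempx:
--                 if sublist not in tempy:
--                     tempy.append(sublist)
--                 else:
--                     tempy.remove(sublist)
--             FF_Sort.append(tempy)
--         else:
--             FF_Sort.append(FF[i])
--
--     return FF_Sort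
-- ===== SOURCE B (Python) =====
-- def sort_function(FF):
--     """Remove all duplicate monomials in the feedback functions FF.
--
--     Count-then-filter: an element survives iff its total count is odd; survivors
--     are ordered by their last occurrence (single reverse pass), instead of A's
--     quadratic in-place toggle append/remove.
--     """
--     FF_Sort = []
--     for f in FF:
--         if type(f) == list:
--             counts = {}
--             for s in f:
--                 counts[s] = counts.get(s, 0) + 1
--             out = []
--             seen = set()
--             for s in reversed(f):
--                 if counts[s] % 2 == 1 and s not in seen:
--                     seen.add(s)
--                     out.append(s)
--             out.reverse()
--             FF_Sort.append(out)
--         else: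
--             FF_Sort.append(f)
--     return FF_Sort
-- ===== Notes on version B (the rewrite author's own statement) =====
-- stated objective: faster
-- what changed: Replaces the quadratic in-place toggle (membership test + list.remove per element) by a hash count pass plus one reverse filter pass keeping odd-count elements at their last occurrence.
import Mathlib
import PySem

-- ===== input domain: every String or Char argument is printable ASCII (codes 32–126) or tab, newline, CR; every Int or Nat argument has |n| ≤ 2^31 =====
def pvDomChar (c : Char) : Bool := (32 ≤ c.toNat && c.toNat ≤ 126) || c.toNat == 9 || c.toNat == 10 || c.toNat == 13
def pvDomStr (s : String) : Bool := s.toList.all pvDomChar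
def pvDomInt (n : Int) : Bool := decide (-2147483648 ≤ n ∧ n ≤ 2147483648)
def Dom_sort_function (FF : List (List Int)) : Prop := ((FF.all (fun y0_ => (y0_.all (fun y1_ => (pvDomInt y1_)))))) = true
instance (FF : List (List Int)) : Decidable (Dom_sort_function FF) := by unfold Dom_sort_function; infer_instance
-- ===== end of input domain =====

-- B replaces A's quadratic in-place toggle (membership + list.remove per element) by a
-- counting pass plus one reverse filter pass (keep odd-count elements at their last
-- occurrence); proved to return the same value on every input.


-- ===== PORT A =====
-- 'for i in range(len(FF))' with 'FF_Sort.append(...)' reads FF[i] in order: folded over FF.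
-- At this type every FF[i] is a list, so the 'type(FF[i]) == list' branch is always taken.
-- 'tempy.remove(sublist)' is reached only when sublist ∈ tempy, so remove? is some there;
-- '.getD tempy' is the (unreachable) ValueError arm.
def sort_function (FF : List (List Int)) : List (List Int) :=
  FF.foldl (fun FF_Sort tempx =>
    FF_Sort ++ [tempx.foldl (fun tempy sublist =>
      if sublist ∉ tempy then tempy ++ [sublist]
      else (PySem.List.remove? tempy sublist).getD tempy) []]) []

-- ===== PORT B =====
-- count each element, then scan reversed(f) keeping odd-count elements not yet seen,
-- finally reverse the collected list (out.reverse()).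
def dedupOddLast (f : List Int) : List Int :=
  let counts := f.foldl (fun d s => d.insert s (d.getD s 0 + 1)) PySem.Dict.empty
  let p := f.reverse.foldl (fun (q : List Int × PySem.Set Int) s =>
      if (PySem.Int.mod (counts.getD s 0) 2 == 1) && !(PySem.Set.contains q.2 s)
      then (q.1 ++ [s], PySem.Set.add q.2 s) else q) ([], PySem.Set.empty)
  p.1.reverse

def sort_function_alt (FF : List (List Int)) : List (List Int) :=
  FF.map dedupOddLast

-- ===== PRECONDITION & SPEC =====
def Spec_sort_function (FF : List (List Int)) (out : List (List Int)) : Prop := out = sort_function_alt FF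
instance (FF : List (List Int)) (out : List (List Int)) : Decidable (Spec_sort_function FF out) := by unfold Spec_sort_function; infer_instance

-- ===== CLAIM (what is proved, stated in full; the proofs are below) =====
def Claim_equal_sort_function : Prop := ∀ (FF : List (List Int)), Dom_sort_function FF → Spec_sort_function FF (sort_function FF)

-- ===== LEMMAS AND PROOFS =====

-- A's inner toggle step.
def stepA (tempy : List Int) (s : Int) : List Int :=
  if s ∉ tempy then tempy ++ [s] else (PySem.List.remove? tempy s).getD tempy

-- Abstract form of B's reverse scan: emit x when p x holds and x unseen, then mark seen.
def scan (p : Int → Bool) : PySem.Set Int → List Int → List Int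
  | _, [] => []
  | seen, x :: l =>
    if p x = true ∧ x ∉ seen then x :: scan p (PySem.Set.add seen x) l
    else scan p seen l

-- the Bool condition of B's fold is the Prop condition of scan
theorem cond_eq (p : Int → Bool) (seen : PySem.Set Int) (x : Int) :
    (p x && !(PySem.Set.contains seen x)) = decide (p x = true ∧ x ∉ seen) := by
  by_cases hp : p x = true
  · by_cases hs : x ∈ seen
    · simp [hp, hs]
    · have hc : PySem.Set.contains seen x = false := by
        rw [Bool.eq_false_iff]
        exact fun h => hs ((PySem.Set.contains_iff seen x).mp h)
      simp [hp, hs]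
  · simp [Bool.eq_false_iff.mpr hp]

theorem foldl_scan (p : Int → Bool) (l : List Int) :
    ∀ (acc : List Int) (seen : PySem.Set Int),
      (l.foldl (fun (q : List Int × PySem.Set Int) s =>
        if p s && !(PySem.Set.contains q.2 s) then (q.1 ++ [s], PySem.Set.add q.2 s) else q)
        (acc, seen)).1 = acc ++ scan p seen l := by
  induction l with
  | nil => intro acc seen; simp [scan]
  | cons x l ih =>
    intro acc seen
    rw [List.foldl_cons]
    by_cases hx : p x = true ∧ x ∉ seen
    · rw [if_pos (by rw [cond_eq]; exact decide_eq_true hx), ih]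
      simp only [scan]
      rw [if_pos hx, List.append_assoc, List.singleton_append]
    · rw [if_neg (by rw [cond_eq]; exact fun c => hx (of_decide_eq_true c)), ih]
      simp only [scan]
      rw [if_neg hx]

theorem scan_congr (p p' : Int → Bool) (l : List Int) :
    ∀ (seen seen' : PySem.Set Int),
      (∀ x, (p x = true ∧ x ∉ seen) ↔ (p' x = true ∧ x ∉ seen')) →
      scan p seen l = scan p' seen' l := by
  induction l with
  | nil => intro _ _ _; simp [scan]
  | cons x l ih =>
    intro seen seen' h
    simp only [scan]
    by_cases hx : p x = true ∧ x ∉ seen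
    · rw [if_pos hx, if_pos ((h x).mp hx)]
      have hnext : ∀ y, (p y = true ∧ y ∉ PySem.Set.add seen x) ↔ (p' y = true ∧ y ∉ PySem.Set.add seen' x) := by
        intro y
        constructor
        · rintro ⟨hpy, hny⟩
          have hy := (h y).mp ⟨hpy, fun m => hny ((PySem.Set.mem_add seen x y).mpr (Or.inl m))⟩
          exact ⟨hy.1, fun m => ((PySem.Set.mem_add seen' x y).mp m).elim hy.2
            (fun e => hny ((PySem.Set.mem_add seen x y).mpr (Or.inr e)))⟩
        · rintro ⟨hpy, hny⟩
          have hy := (h y).mpr ⟨hpy, fun m => hny ((PySem.Set.mem_add seen' x y).mpr (Or.inl m))⟩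
          exact ⟨hy.1, fun m => ((PySem.Set.mem_add seen x y).mp m).elim hy.2
            (fun e => hny ((PySem.Set.mem_add seen' x y).mpr (Or.inr e)))⟩
      exact congrArg (x :: ·) (ih _ _ hnext)
    · rw [if_neg hx, if_neg (fun c => hx ((h x).mpr c))]
      exact ih _ _ h

theorem mem_scan_pred {p : Int → Bool} {l : List Int} :
    ∀ {seen : PySem.Set Int} {x : Int}, x ∈ scan p seen l → p x = true ∧ x ∉ seen := by
  induction l with
  | nil => intro _ _ h; simp [scan] at h
  | cons y l ih =>
    intro seen x h
    simp only [scan] at h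
    by_cases hb : p y = true ∧ y ∉ seen
    · rw [if_pos hb] at h
      rcases List.mem_cons.mp h with rfl | h
      · exact hb
      · have hx := ih h
        exact ⟨hx.1, fun m => hx.2 ((PySem.Set.mem_add seen y x).mpr (Or.inl m))⟩
    · rw [if_neg hb] at h
      exact ih h

theorem mem_scan_of {p : Int → Bool} {l : List Int} :
    ∀ {seen : PySem.Set Int} {x : Int}, x ∈ l → p x = true → x ∉ seen → x ∈ scan p seen l := by
  induction l with
  | nil => intro _ _ h; simp at h
  | cons y l ih =>
    intro seen x hm hp hns
    simp only [scan]
    by_cases hb : p y = true ∧ y ∉ seen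
    · rw [if_pos hb]
      rcases List.mem_cons.mp hm with rfl | hm
      · exact List.mem_cons_self
      · by_cases hxy : x = y
        · subst hxy; exact List.mem_cons_self
        · exact List.mem_cons_of_mem _ (ih hm hp (fun m =>
            ((PySem.Set.mem_add seen y x).mp m).elim hns hxy))
    · rw [if_neg hb]
      rcases List.mem_cons.mp hm with rfl | hm
      · exact absurd ⟨hp, hns⟩ hb
      · exact ih hm hp hns

theorem nodup_scan (p : Int → Bool) (l : List Int) :
    ∀ (seen : PySem.Set Int), (scan p seen l).Nodup := by
  induction l with
  | nil => intro _; simp [scan]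
  | cons x l ih =>
    intro seen
    simp only [scan]
    by_cases hb : p x = true ∧ x ∉ seen
    · rw [if_pos hb]
      refine List.nodup_cons.mpr ⟨fun hm => ?_, ih _⟩
      exact (mem_scan_pred hm).2 ((PySem.Set.mem_add seen x x).mpr (Or.inr rfl))
    · rw [if_neg hb]
      exact ih _

-- Flipping p to false at a (where it was true and a unseen) erases a from the scan.
theorem scan_flip_erase (p p' : Int → Bool) (a : Int)
    (hpp : ∀ x, x ≠ a → p' x = p x) (hpa : p a = true) (hpa' : p' a = false)
    (l : List Int) :
    ∀ (seen : PySem.Set Int), a ∉ seen →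
      scan p' seen l = (scan p seen l).erase a := by
  induction l with
  | nil => intro _ _; simp [scan]
  | cons x l ih =>
    intro seen hns
    simp only [scan]
    by_cases hxa : x = a
    · subst hxa
      rw [if_neg (fun c => by rw [hpa'] at c; exact Bool.false_ne_true c.1),
          if_pos ⟨hpa, hns⟩, List.erase_cons_head]
      apply scan_congr
      intro y
      constructor
      · rintro ⟨hpy, hny⟩
        by_cases hya : y = x
        · subst hya; rw [hpa'] at hpy; exact absurd hpy Bool.false_ne_true
        · exact ⟨(hpp y hya) ▸ hpy,
            fun m => ((PySem.Set.mem_add seen x y).mp m).elim hny hya⟩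
      · rintro ⟨hpy, hny⟩
        have hya : y ≠ x := fun e => hny (e ▸ (PySem.Set.mem_add seen x y).mpr (Or.inr e))
        exact ⟨(hpp y hya) ▸ hpy, fun m => hny ((PySem.Set.mem_add seen x y).mpr (Or.inl m))⟩
    · have hpx : p' x = p x := hpp x hxa
      by_cases hb : p x = true ∧ x ∉ seen
      · rw [if_pos hb, if_pos ⟨hpx ▸ hb.1, hb.2⟩]
        rw [List.erase_cons_tail (by simp [hxa])]
        exact congrArg (x :: ·) (ih _ (fun m =>
          ((PySem.Set.mem_add seen x a).mp m).elim hns (fun e => hxa e.symm)))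
      · rw [if_neg hb, if_neg (fun c => hb ⟨hpx ▸ c.1, c.2⟩)]
        exact ih _ hns

-- B's parity predicate over the whole list.
def predB (f : List Int) (x : Int) : Bool := f.count x % 2 == 1

theorem predB_counter (f : List Int) (x : Int) :
    (PySem.Int.mod ((PySem.Dict.counter f).getD x 0) 2 == 1) = predB f x := by
  rw [PySem.Dict.getD_counter, show (2 : Int) = ((2 : Nat) : Int) by norm_num,
      PySem.Int.mod_natCast]
  unfold predB
  by_cases h : List.count x f % 2 = 1
  · simp [h]
  · have h0 : List.count x f % 2 = 0 := by omega
    rw [h0]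
    simp

-- B's helper in closed scan form.
theorem dedupOddLast_eq_scan (f : List Int) :
    dedupOddLast f = (scan (predB f) PySem.Set.empty f.reverse).reverse := by
  have h1 : dedupOddLast f = (f.reverse.foldl (fun (q : List Int × PySem.Set Int) s =>
      if (PySem.Int.mod ((PySem.Dict.counter f).getD s 0) 2 == 1) && !(PySem.Set.contains q.2 s)
      then (q.1 ++ [s], PySem.Set.add q.2 s) else q) ([], PySem.Set.empty)).1.reverse := by
    unfold dedupOddLast
    rw [PySem.Dict.foldl_insert_getD_add_one_eq_counter]
  rw [h1, foldl_scan, List.nil_append]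
  apply congrArg List.reverse
  apply scan_congr
  intro x
  rw [predB_counter]

-- membership in B's result ↔ odd count
theorem mem_dedup_scan (f : List Int) (x : Int) :
    x ∈ scan (predB f) PySem.Set.empty f.reverse ↔ f.count x % 2 = 1 := by
  constructor
  · intro h
    have hp := (mem_scan_pred h).1
    simpa [predB] using hp
  · intro h
    have hm : x ∈ f := by
      by_contra hnm
      rw [List.count_eq_zero_of_not_mem hnm] at h
      simp at h
    exact mem_scan_of (List.mem_reverse.mpr hm) (by simpa [predB] using h)
      List.not_mem_nil

-- the per-function equivalence: A's toggle fold equals B's count-and-filter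
theorem toggle_eq_dedup (f : List Int) :
    f.foldl stepA [] = dedupOddLast f := by
  induction f using List.reverseRecOn with
  | nil => rfl
  | append_singleton f a ih =>
    rw [List.foldl_append, List.foldl_cons, List.foldl_nil, ih]
    rw [dedupOddLast_eq_scan, dedupOddLast_eq_scan]
    rw [List.reverse_append]
    simp only [List.reverse_cons, List.reverse_nil, List.nil_append, List.singleton_append]
    have hcs : List.count a (f ++ [a]) = List.count a f + 1 := by simp
    have hcn : ∀ x, x ≠ a → List.count x (f ++ [a]) = List.count x f := by
      intro x hx
      have hax : ¬(a = x) := fun e => hx e.symm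
      simp [List.count_append, hax]
    by_cases hodd : List.count a f % 2 = 1
    · -- a already present (odd in f): A removes it; B drops it (even in f ++ [a])
      have hmem : a ∈ scan (predB f) PySem.Set.empty f.reverse := (mem_dedup_scan f a).mpr hodd
      have hmemB : a ∈ (scan (predB f) PySem.Set.empty f.reverse).reverse := List.mem_reverse.mpr hmem
      have hpa' : predB (f ++ [a]) a = false := by
        simp only [predB, hcs, beq_eq_false_iff_ne, ne_eq]
        omega
      have hstep : stepA ((scan (predB f) PySem.Set.empty f.reverse).reverse) a
          = ((scan (predB f) PySem.Set.empty f.reverse).reverse).erase a := by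
        unfold stepA
        rw [if_neg (not_not_intro hmemB),
            PySem.List.remove?_eq_some_erase _ a hmemB, Option.getD_some]
      rw [hstep]
      simp only [scan]
      rw [if_neg (fun c => by rw [hpa'] at c; exact Bool.false_ne_true c.1)]
      have herase : scan (predB (f ++ [a])) PySem.Set.empty f.reverse
          = (scan (predB f) PySem.Set.empty f.reverse).erase a := by
        apply scan_flip_erase
        · intro x hx
          simp only [predB, hcn x hx]
        · simp [predB, hodd]
        · exact hpa'
        · exact List.not_mem_nil
      rw [herase]
      have hnd : (scan (predB f) PySem.Set.empty f.reverse).Nodup := nodup_scan _ _ _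
      rw [List.Nodup.erase_eq_filter (List.nodup_reverse.mpr hnd),
          List.Nodup.erase_eq_filter hnd, List.filter_reverse]
    · -- a new or cancelled-out (even in f): A appends; B keeps it, last
      have hnmem : a ∉ (scan (predB f) PySem.Set.empty f.reverse).reverse := by
        rw [List.mem_reverse, mem_dedup_scan]
        exact hodd
      have hstep : stepA ((scan (predB f) PySem.Set.empty f.reverse).reverse) a
          = (scan (predB f) PySem.Set.empty f.reverse).reverse ++ [a] := by
        unfold stepA
        rw [if_pos hnmem]
      rw [hstep]
      have hpa' : predB (f ++ [a]) a = true := by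
        simp only [predB, hcs, beq_iff_eq]
        omega
      simp only [scan]
      rw [if_pos ⟨hpa', List.not_mem_nil⟩, List.reverse_cons]
      apply congrArg (· ++ [a])
      apply congrArg List.reverse
      apply scan_congr
      intro x
      constructor
      · rintro ⟨hpx, -⟩
        have hxa : x ≠ a := by
          intro e; subst e
          simp only [predB, beq_iff_eq] at hpx
          exact hodd hpx
        refine ⟨by simp only [predB, hcn x hxa]; exact hpx, fun m => ?_⟩
        rcases (PySem.Set.mem_add PySem.Set.empty a x).mp m with hm | hm
        · exact absurd hm List.not_mem_nil
        · exact hxa hm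
      · rintro ⟨hpx, hnx⟩
        have hxa : x ≠ a := fun e =>
          hnx ((PySem.Set.mem_add PySem.Set.empty a x).mpr (Or.inr e))
        refine ⟨by simp only [predB, hcn x hxa] at hpx; exact hpx, List.not_mem_nil⟩

-- ===== VERDICT (by name: the statement is the Claim_ definition above) =====
theorem sort_function_spec : Claim_equal_sort_function := by
  intro FF _
  unfold Spec_sort_function sort_function sort_function_alt
  rw [PySem.List.foldl_append_singleton_eq_map, List.nil_append]
  apply List.map_congr_left
  intro f _
  exact toggle_eq_dedup f
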